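-- pv_equiv track=rewrite | github.com/BessieChen/Coursera-Genome-Assembly-Programming-Challenge | week1/Q1/submit001.py | Classes_of_Char
-- ===== SOURCE A (Python) =====
-- def Classes_of_Char( S, order ):
--     l = len(S)
--     charClass = [0] * l
--     charClass[order[0]] = 0
--     for i in range(1, l):
--         if S[order[i]] != S[order[i - 1]]:
--             charClass[order[i]] = charClass[order[i - 1]] + 1
--         else:
--             charClass[order[i]] = charClass[order[i - 1]]
--     return charClass
-- ===== SOURCE B (Python) =====
-- def Classes_of_Char(S, order):
--     l = len(S)
--     # pass 1: 0/1 indicator per sorted rank (1 iff the character changes)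
--     bumps = [0] * l
--     for i in range(1, l):
--         bumps[i] = 0 if S[order[i]] == S[order[i - 1]] else 1
--     # pass 2: running sum turns indicators into class numbers per rank
--     classes = []
--     c = 0
--     for b in bumps:
--         c += b
--         classes.append(c)
--     # pass 3: scatter class numbers back to string positions
--     charClass = [0] * l
--     for i in range(l):
--         charClass[order[i]] = classes[i]
--     return charClass
-- ===== Notes on version B (the rewrite author's own statement) =====
-- stated objective: idiomatic
-- what changed: A interleaves comparing, reading the previous class and writing in one stateful loop; B decomposes into three independent passes: build a 0/1 change-indicator list over the sorted ranks, turn it into class numbers with a running-sum (accumulate) pass, then scatter the per-rank classes back to string positions.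
import Mathlib
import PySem

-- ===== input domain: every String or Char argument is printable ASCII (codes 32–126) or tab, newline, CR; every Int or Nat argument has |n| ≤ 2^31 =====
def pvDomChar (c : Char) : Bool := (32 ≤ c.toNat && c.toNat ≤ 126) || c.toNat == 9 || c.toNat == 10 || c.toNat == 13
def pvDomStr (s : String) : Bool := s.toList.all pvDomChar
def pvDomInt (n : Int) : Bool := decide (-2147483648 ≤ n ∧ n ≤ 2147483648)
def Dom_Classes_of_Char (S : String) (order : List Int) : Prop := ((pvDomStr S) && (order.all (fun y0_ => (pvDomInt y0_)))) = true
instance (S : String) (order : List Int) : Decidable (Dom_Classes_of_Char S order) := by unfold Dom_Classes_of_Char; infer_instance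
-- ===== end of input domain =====

-- B replaces A's single stateful loop (compare, read previous class, write) by three independent
-- passes: a 0/1 change-indicator list over the sorted ranks, a running-sum pass turning it into
-- class numbers, and a scatter back to string positions (objective: idiomatic decomposition).

-- ===== PORT A =====
def Classes_of_Char (S : String) (order : List Int) : List Int :=
  let l : Int := PySem.Str.len S
  let charClass : List Int := List.replicate l.toNat 0
  let charClass : List Int := PySem.List.pySetD charClass (PySem.List.pyGetD order 0 0) 0
  (PySem.List.pyRange 1 l 1).foldl
    (fun cc i =>
      if PySem.Str.pyGet? S (PySem.List.pyGetD order i 0) ≠ PySem.Str.pyGet? S (PySem.List.pyGetD order (i - 1) 0) then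
        PySem.List.pySetD cc (PySem.List.pyGetD order i 0)
          (PySem.List.pyGetD cc (PySem.List.pyGetD order (i - 1) 0) 0 + 1)
      else
        PySem.List.pySetD cc (PySem.List.pyGetD order i 0)
          (PySem.List.pyGetD cc (PySem.List.pyGetD order (i - 1) 0) 0))
    charClass

-- ===== PORT B =====
def Classes_of_Char_alt (S : String) (order : List Int) : List Int :=
  let l : Int := PySem.Str.len S
  -- pass 1: indicator list
  let bumps : List Int := (PySem.List.pyRange 1 l 1).foldl
    (fun bs i => PySem.List.pySetD bs i
      (if PySem.Str.pyGet? S (PySem.List.pyGetD order i 0) = PySem.Str.pyGet? S (PySem.List.pyGetD order (i - 1) 0) then 0 else 1))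
    (List.replicate l.toNat 0)
  -- pass 2: running sum
  let classes : List Int :=
    (bumps.foldl (fun (p : List Int × Int) b => (p.1 ++ [p.2 + b], p.2 + b)) ([], 0)).1
  -- pass 3: scatter
  (PySem.List.pyRange 0 l 1).foldl
    (fun cc i => PySem.List.pySetD cc (PySem.List.pyGetD order i 0) (PySem.List.pyGetD classes i 0))
    (List.replicate l.toNat 0)

-- ===== PRECONDITION & SPEC =====
-- Pre_ excludes exactly the inputs where the Python A raises IndexError: empty S (order[0] or
-- charClass[order[0]] fails), order shorter than len(S), or an order entry outside [-len(S), len(S)).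
def Pre_Classes_of_Char (S : String) (order : List Int) : Prop :=
  0 < S.toList.length ∧ S.toList.length ≤ order.length ∧
  ∀ i : Nat, i < S.toList.length →
    -(S.toList.length : Int) ≤ order.getD i 0 ∧ order.getD i 0 < (S.toList.length : Int)
instance (S : String) (order : List Int) : Decidable (Pre_Classes_of_Char S order) := by
  unfold Pre_Classes_of_Char; infer_instance

def pvWitness_Classes_of_Char : String × List Int := ("ab", [1, 0])

def Spec_Classes_of_Char (S : String) (order : List Int) (out : List Int) : Prop :=
  out = Classes_of_Char_alt S order
instance (S : String) (order : List Int) (out : List Int) : Decidable (Spec_Classes_of_Char S order out) := by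
  unfold Spec_Classes_of_Char; infer_instance

-- ===== CLAIM (what is proved, stated in full; the proofs are below) =====
def Claim_equal_Classes_of_Char : Prop := ∀ (S : String) (order : List Int),
  Dom_Classes_of_Char S order → Pre_Classes_of_Char S order →
  Spec_Classes_of_Char S order (Classes_of_Char S order)

-- ===== LEMMAS AND PROOFS =====

-- normalised Python index (negative indices wrap by the length)
def nidx (l : Nat) (j : Int) : Nat := (if j < 0 then j + l else j).toNat
-- normalised index of order[i]
def ordN (l : Nat) (order : List Int) (i : Nat) : Nat := nidx l (order.getD i 0)
-- the 0/1 indicator at sorted rank i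
def bmp (cs : List Char) (l : Nat) (order : List Int) : Nat → Int
  | 0 => 0
  | i + 1 => if cs.getD (ordN l order (i + 1)) ' ' = cs.getD (ordN l order i) ' ' then 0 else 1
-- the class number at sorted rank i (prefix sum of bmp)
def clsN (cs : List Char) (l : Nat) (order : List Int) : Nat → Int
  | 0 => 0
  | i + 1 => clsN cs l order i + bmp cs l order (i + 1)
-- scatter of f over the first n sorted ranks
def scat (l : Nat) (order : List Int) (f : Nat → Int) (n : Nat) : List Int :=
  (List.range n).foldl (fun cc i => cc.set (ordN l order i) (f i)) (List.replicate l 0)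
-- running sums (Python's accumulate) of a list, starting from c
def accL (c : Int) : List Int → List Int
  | [] => []
  | b :: bs => (c + b) :: accL (c + b) bs

theorem pyIdx_eq (n : Nat) (j : Int) (h1 : -(n : Int) ≤ j) (h2 : j < n) :
    PySem.List.pyIdx? n j = some (nidx n j) := by
  unfold PySem.List.pyIdx? nidx
  split_ifs with ha hb hc <;> simp_all <;> omega

theorem nidx_lt (n : Nat) (j : Int) (h1 : -(n : Int) ≤ j) (h2 : j < n) : nidx n j < n := by unfold nidx; split_ifs <;> omega

theorem pyGet?_nidx {α : Type} (xs : List α) (j : Int) (h1 : -(xs.length : Int) ≤ j)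
    (h2 : j < xs.length) : PySem.List.pyGet? xs j = xs[nidx xs.length j]? := by
  simp [PySem.List.pyGet?, pyIdx_eq xs.length j h1 h2]

theorem pySetD_nidx {α : Type} (xs : List α) (j : Int) (v : α) (h1 : -(xs.length : Int) ≤ j)
    (h2 : j < xs.length) : PySem.List.pySetD xs j v = xs.set (nidx xs.length j) v := by
  simp [PySem.List.pySetD, PySem.List.pySet?, pyIdx_eq xs.length j h1 h2]

theorem pyGetD_nidx {α : Type} [Inhabited α] (xs : List α) (j : Int) (d : α)
    (h1 : -(xs.length : Int) ≤ j) (h2 : j < xs.length) :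
    PySem.List.pyGetD xs j d = xs.getD (nidx xs.length j) d := by
  simp [PySem.List.pyGetD, pyGet?_nidx xs j h1 h2, List.getD_eq_getElem?_getD]

theorem length_scat (l : Nat) (order : List Int) (f : Nat → Int) (n : Nat) :
    (scat l order f n).length = l := by
  induction n with
  | zero => simp [scat]
  | succ n ih => simp [scat, List.range_succ, List.foldl_append] at ih ⊢; simpa using ih

theorem scat_succ (l : Nat) (order : List Int) (f : Nat → Int) (n : Nat) :
    scat l order f (n + 1) = (scat l order f n).set (ordN l order n) (f n) := by
  simp [scat, List.range_succ]

theorem getD_scat_last (l : Nat) (order : List Int) (f : Nat → Int) (n : Nat)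
    (h : ordN l order n < l) : (scat l order f (n + 1)).getD (ordN l order n) 0 = f n := by
  rw [scat_succ, List.getD_eq_getElem]
  · exact List.getElem_set_self _
  · simp [length_scat, h]

theorem bmp_succ (cs : List Char) (l : Nat) (order : List Int) (n : Nat) (hn : 1 ≤ n) :
    bmp cs l order n = if cs.getD (ordN l order n) ' ' = cs.getD (ordN l order (n-1)) ' ' then 0 else 1 := by
  obtain ⟨m, rfl⟩ : ∃ m, n = m + 1 := ⟨n - 1, by omega⟩
  simp [bmp]

theorem clsN_succ (cs : List Char) (l : Nat) (order : List Int) (n : Nat) (hn : 1 ≤ n) :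
    clsN cs l order n = clsN cs l order (n-1) + bmp cs l order n := by
  obtain ⟨m, rfl⟩ : ∃ m, n = m + 1 := ⟨n - 1, by omega⟩
  simp [clsN]

theorem char_get (cs : List Char) (order : List Int) (k : Nat)
    (h1 : -(cs.length : Int) ≤ order.getD k 0) (h2 : order.getD k 0 < cs.length) :
    PySem.Chars.pyGet? cs (order.getD k 0) = some (cs.getD (ordN cs.length order k) ' ') := by
  show PySem.List.pyGet? cs (order.getD k 0) = _
  rw [pyGet?_nidx cs _ h1 h2]
  have h := nidx_lt cs.length (order.getD k 0) h1 h2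
  simp only [ordN, List.getD_eq_getElem?_getD] at h ⊢
  rw [List.getElem?_eq_getElem h]
  rfl

theorem read_scat (cs : List Char) (order : List Int) (f : Nat → Int) (m k : Nat)
    (h1 : -(cs.length : Int) ≤ order.getD k 0) (h2 : order.getD k 0 < cs.length) :
    PySem.List.pyGetD (scat cs.length order f m) (order.getD k 0) 0
      = (scat cs.length order f m).getD (ordN cs.length order k) 0 := by
  have h := pyGetD_nidx (scat cs.length order f m) (order.getD k 0) 0
      (by rw [length_scat]; exact h1) (by rw [length_scat]; exact h2)
  rw [length_scat] at h
  exact h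

theorem write_scat (cs : List Char) (order : List Int) (f : Nat → Int) (m k : Nat) (v : Int)
    (h1 : -(cs.length : Int) ≤ order.getD k 0) (h2 : order.getD k 0 < cs.length) :
    PySem.List.pySetD (scat cs.length order f m) (order.getD k 0) v
      = (scat cs.length order f m).set (ordN cs.length order k) v := by
  have h := pySetD_nidx (scat cs.length order f m) (order.getD k 0) v
      (by rw [length_scat]; exact h1) (by rw [length_scat]; exact h2)
  rw [length_scat] at h
  exact h

theorem A_loop (S : String) (order : List Int)
    (hb : ∀ i, i < S.toList.length → -(S.toList.length:Int) ≤ order.getD i 0 ∧ order.getD i 0 < S.toList.length) :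
    ∀ n, 1 ≤ n → n ≤ S.toList.length →
    ((PySem.List.pyRange 1 (n:Int) 1).foldl
      (fun cc i =>
        if PySem.Str.pyGet? S (PySem.List.pyGetD order i 0) ≠ PySem.Str.pyGet? S (PySem.List.pyGetD order (i-1) 0)
        then PySem.List.pySetD cc (PySem.List.pyGetD order i 0) (PySem.List.pyGetD cc (PySem.List.pyGetD order (i-1) 0) 0 + 1)
        else PySem.List.pySetD cc (PySem.List.pyGetD order i 0) (PySem.List.pyGetD cc (PySem.List.pyGetD order (i-1) 0) 0))
      (List.replicate S.toList.length 0)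
    = scat S.toList.length order (clsN S.toList S.toList.length order) n)
    ∧ (scat S.toList.length order (clsN S.toList S.toList.length order) n).getD (ordN S.toList.length order (n-1)) 0
        = clsN S.toList S.toList.length order (n-1) := by
  intro n hn hnl
  simp only [PySem.Str.pyGet?]
  induction n, hn using Nat.le_induction with
  | base =>
      constructor
      · rw [PySem.List.pyRange_one_eq_nil (by norm_num)]
        show List.replicate S.toList.length 0 = scat S.toList.length order _ 1
        rw [show (1:Nat) = 0 + 1 from rfl, scat_succ]
        simp [scat, clsN, List.set_replicate_self]
      · have h0 := hb 0 (by omega)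
        have := getD_scat_last S.toList.length order (clsN S.toList S.toList.length order) 0
          (nidx_lt S.toList.length _ h0.1 h0.2)
        simpa [clsN] using this
  | succ n hn ih =>
      have hnl' : n ≤ S.toList.length := by omega
      obtain ⟨ih1, ih2⟩ := ih hnl'
      have hbn := hb n (by omega)
      have hbn1 := hb (n-1) (by omega)
      have hcast : ((n+1:Nat):Int) = (n:Int) + 1 := by push_cast; ring
      have hrange : PySem.List.pyRange 1 ((n:Int)+1) 1
          = PySem.List.pyRange 1 (n:Int) 1 ++ [(n:Int)] := by
        exact PySem.List.pyRange_one_succ_right (by omega)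
      constructor
      · rw [hcast, hrange, List.foldl_append, ih1]
        simp only [List.foldl_cons, List.foldl_nil]
        rw [show ((n:Int) - 1) = ((n-1:Nat):Int) by omega]
        simp only [PySem.List.pyGetD_natCast]
        rw [char_get S.toList order n hbn.1 hbn.2, char_get S.toList order (n-1) hbn1.1 hbn1.2,
            read_scat S.toList order _ n (n-1) hbn1.1 hbn1.2, ih2,
            scat_succ, clsN_succ S.toList S.toList.length order n hn, bmp_succ S.toList S.toList.length order n hn,
            write_scat S.toList order _ n n _ hbn.1 hbn.2, write_scat S.toList order _ n n _ hbn.1 hbn.2]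
        by_cases hc : S.toList[ordN S.length order n]?.getD ' ' = S.toList[ordN S.length order (n-1)]?.getD ' ' <;>
          simp [hc]
      · have := getD_scat_last S.toList.length order (clsN S.toList S.toList.length order) n
          (nidx_lt S.toList.length _ hbn.1 hbn.2)
        simpa using this

theorem B_bumps (S : String) (order : List Int)
    (hb : ∀ i, i < S.toList.length → -(S.toList.length:Int) ≤ order.getD i 0 ∧ order.getD i 0 < S.toList.length) :
    ∀ n, 1 ≤ n → n ≤ S.toList.length →
    (PySem.List.pyRange 1 (n:Int) 1).foldl
      (fun bs i => PySem.List.pySetD bs i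
        (if PySem.Str.pyGet? S (PySem.List.pyGetD order i 0) = PySem.Str.pyGet? S (PySem.List.pyGetD order (i-1) 0) then 0 else 1))
      (List.replicate S.toList.length 0)
    = (List.range S.toList.length).map (fun i => if i < n then bmp S.toList S.toList.length order i else 0) := by
  intro n hn hnl
  simp only [PySem.Str.pyGet?]
  induction n, hn using Nat.le_induction with
  | base =>
      rw [PySem.List.pyRange_one_eq_nil (by norm_num)]
      simp only [List.foldl_nil]
      apply List.ext_getElem (by simp)
      intro i h1 h2
      simp only [List.getElem_replicate, List.getElem_map, List.getElem_range]
      split_ifs with h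
      · interval_cases i
        simp [bmp]
      · rfl
  | succ n hn ih =>
      have hnl' : n ≤ S.toList.length := by omega
      have hbn := hb n (by omega)
      have hbn1 := hb (n-1) (by omega)
      have hrange : PySem.List.pyRange 1 ((n:Int)+1) 1
          = PySem.List.pyRange 1 (n:Int) 1 ++ [(n:Int)] :=
        PySem.List.pyRange_one_succ_right (by omega)
      rw [show ((n+1:Nat):Int) = (n:Int) + 1 by push_cast; ring, hrange, List.foldl_append,
          ih hnl']
      simp only [List.foldl_cons, List.foldl_nil, PySem.List.pyGetD_natCast,
        PySem.List.pySetD_natCast]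
      rw [show ((n:Int) - 1) = ((n-1:Nat):Int) by omega]
      simp only [PySem.List.pyGetD_natCast]
      rw [char_get S.toList order n hbn.1 hbn.2, char_get S.toList order (n-1) hbn1.1 hbn1.2]
      apply List.ext_getElem (by simp)
      intro i h1 h2
      rw [List.getElem_set]
      simp only [List.getElem_map, List.getElem_range]
      by_cases hin : n = i
      · subst hin
        simp only [if_pos (by omega : n < n + 1), reduceIte]
        rw [bmp_succ S.toList S.toList.length order n hn]
        split_ifs with h <;> simp_all
      · simp only [if_neg hin]
        by_cases h' : i < n
        · rw [if_pos h', if_pos (by omega)]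
        · rw [if_neg h', if_neg (by omega)]

theorem foldl_acc (bs : List Int) : ∀ (acc : List Int) (c : Int),
    (bs.foldl (fun (p : List Int × Int) b => (p.1 ++ [p.2 + b], p.2 + b)) (acc, c)).1
      = acc ++ accL c bs := by
  induction bs with
  | nil => intro acc c; simp [accL]
  | cons b bs ih => intro acc c; simp [accL, ih (acc ++ [c + b]) (c + b)]

theorem accL_getD (bs : List Int) : ∀ (c : Int) (i : Nat), i < bs.length →
    (accL c bs).getD i 0 = c + (bs.take (i+1)).sum := by
  induction bs with
  | nil => intro c i h; simp at h
  | cons b bs ih =>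
      intro c i h
      cases i with
      | zero => simp [accL]
      | succ i =>
          simp only [accL, List.getD_cons_succ, List.take_succ_cons, List.sum_cons]
          rw [ih (c + b) i (by simpa using h)]
          ring

theorem clsN_sum (cs : List Char) (l : Nat) (order : List Int) : ∀ n,
    clsN cs l order n = ((List.range (n+1)).map (bmp cs l order)).sum := by
  intro n
  induction n with
  | zero => simp [clsN, bmp]
  | succ n ih => rw [List.range_succ]; simp [clsN, ih]

theorem classes_getD (cs : List Char) (order : List Int) (i : Nat) (hi : i < cs.length) :
    (accL 0 ((List.range cs.length).map (bmp cs cs.length order))).getD i 0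
      = clsN cs cs.length order i := by
  rw [accL_getD _ 0 i (by simpa using hi), ← List.map_take, List.take_range,
      clsN_sum cs cs.length order i]
  simp [Nat.min_eq_left (by omega : i + 1 ≤ cs.length)]

theorem B_scat (cs : List Char) (order : List Int)
    (hb : ∀ i, i < cs.length → -(cs.length:Int) ≤ order.getD i 0 ∧ order.getD i 0 < cs.length) :
    ∀ n, n ≤ cs.length →
    (PySem.List.pyRange 0 (n:Int) 1).foldl
      (fun cc i => PySem.List.pySetD cc (PySem.List.pyGetD order i 0)
        (PySem.List.pyGetD (accL 0 ((List.range cs.length).map (bmp cs cs.length order))) i 0))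
      (List.replicate cs.length 0)
    = scat cs.length order (clsN cs cs.length order) n := by
  intro n hnl
  induction n with
  | zero => simp [PySem.List.pyRange_one_eq_nil, scat]
  | succ n ih =>
      have hnl' : n ≤ cs.length := by omega
      have hbn := hb n (by omega)
      have hrange : PySem.List.pyRange 0 ((n:Int)+1) 1
          = PySem.List.pyRange 0 (n:Int) 1 ++ [(n:Int)] :=
        PySem.List.pyRange_one_succ_right (by omega)
      rw [show ((n+1:Nat):Int) = (n:Int) + 1 by push_cast; ring, hrange, List.foldl_append,
          ih hnl']
      simp only [List.foldl_cons, List.foldl_nil, PySem.List.pyGetD_natCast]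
      rw [classes_getD cs order n (by omega),
          write_scat cs order _ n n _ hbn.1 hbn.2, scat_succ]

-- ===== VERDICT (by name: the statement is the Claim_ definition above) =====
theorem Classes_of_Char_spec : Claim_equal_Classes_of_Char := by
  intro S order _hD hP
  obtain ⟨hL, hlen, hb⟩ := hP
  show Classes_of_Char S order = Classes_of_Char_alt S order
  unfold Classes_of_Char Classes_of_Char_alt
  simp only [PySem.Str.len_eq, Int.toNat_natCast, PySem.List.pyGetD_zero]
  have hinit : PySem.List.pySetD (List.replicate S.toList.length (0:Int)) (order.getD 0 0) 0
      = List.replicate S.toList.length 0 := by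
    have h0 := hb 0 hL
    rw [pySetD_nidx _ _ _ (by simpa using h0.1) (by simpa using h0.2),
        List.set_replicate_self]
  rw [hinit]
  have hA := (A_loop S order hb S.toList.length hL le_rfl).1
  have hBb := B_bumps S order hb S.toList.length hL le_rfl
  have hmap : (List.range S.toList.length).map
        (fun i => if i < S.toList.length then bmp S.toList S.toList.length order i else 0)
      = (List.range S.toList.length).map (bmp S.toList S.toList.length order) := by
    apply List.map_congr_left
    intro i hi
    rw [if_pos (List.mem_range.mp hi)]
  have hBs := B_scat S.toList order hb S.toList.length le_rfl
  rw [hBb, hmap, foldl_acc, List.nil_append, hBs]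
  exact hA
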